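-- pv_equiv track=rewrite | github.com/Togibu/contrib-art-patterns | checkerboard/pattern.py | _generate_checkerboard
-- ===== SOURCE A (Python) =====
-- def _generate_checkerboard(num_weeks: int, field_size: int, invert: bool) -> list[list[bool]]:
--     """
--     Checkerboard with `field_size`-wide squares.
--     field_size=1 → classic checker, field_size=2 → 2×2 blocks, etc.
--     """
--     grid = [[False] * num_weeks for _ in range(7)]
--     for r in range(7):
--         for c in range(num_weeks):
--             on = ((r // field_size) + (c // field_size)) % 2 == 0
--             if invert:
--                 on = not on
--             grid[r][c] = on
--     return grid
-- ===== SOURCE B (Python) =====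
-- def _generate_checkerboard(num_weeks: int, field_size: int, invert: bool) -> list[list[bool]]:
--     """
--     Checkerboard built by stamping one column template: compute the base row
--     pattern once, then emit each of the 7 rows as either a copy of it or its
--     element-wise negation.
--     """
--     base = [((c // field_size) % 2 == 0) != invert for c in range(num_weeks)]
--     neg = [not x for x in base]
--     return [list(base) if (r // field_size) % 2 == 0 else list(neg) for r in range(7)]
-- ===== Notes on version B (the rewrite author's own statement) =====
-- stated objective: faster
-- what changed: B computes the base column parity pattern once and stamps each of the 7 rows as that template or its element-wise negation, replacing A's per-cell double loop (7n divisions) with n+7 divisions plus list copies; Pre_ excludes field_size=0, where B's row template step divides by field_size unconditionally and raises even when num_weeks=0 (A returns 7 empty rows there).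
-- outside the precondition, e.g. on _generate_checkerboard(0, 0, False): A returns [[], [], [], [], [], [], []], B raises ZeroDivisionError
import Mathlib
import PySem

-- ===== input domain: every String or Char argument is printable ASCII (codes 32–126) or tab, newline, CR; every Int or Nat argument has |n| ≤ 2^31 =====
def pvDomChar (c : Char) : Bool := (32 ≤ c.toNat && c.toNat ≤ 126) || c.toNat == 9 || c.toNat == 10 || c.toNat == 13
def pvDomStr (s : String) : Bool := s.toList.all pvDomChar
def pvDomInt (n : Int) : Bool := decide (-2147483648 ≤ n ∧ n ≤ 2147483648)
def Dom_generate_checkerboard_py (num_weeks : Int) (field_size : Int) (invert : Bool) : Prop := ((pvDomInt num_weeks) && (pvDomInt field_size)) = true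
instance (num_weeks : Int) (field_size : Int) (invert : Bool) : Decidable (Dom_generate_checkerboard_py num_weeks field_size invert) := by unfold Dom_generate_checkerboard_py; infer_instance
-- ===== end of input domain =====

-- B builds the base column parity pattern once and stamps each of the 7 rows as that
-- template or its element-wise negation, instead of A's per-cell double loop.

-- ===== PORT A =====
-- A fills a pre-allocated 7×num_weeks grid cell by cell; since every cell is
-- overwritten, the double assignment loop is transcribed as the nested map.
def generate_checkerboard_py (num_weeks : Int) (field_size : Int) (invert : Bool) : List (List Bool) :=
  (PySem.List.pyRange 0 7 1).map (fun r =>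
    (PySem.List.pyRange 0 num_weeks 1).map (fun c =>
      let on := PySem.Int.mod (PySem.Int.floordiv r field_size + PySem.Int.floordiv c field_size) 2 == 0
      if invert then !on else on))

-- ===== PORT B =====
def generate_checkerboard_py_alt (num_weeks : Int) (field_size : Int) (invert : Bool) : List (List Bool) :=
  let base := (PySem.List.pyRange 0 num_weeks 1).map (fun c =>
      (PySem.Int.mod (PySem.Int.floordiv c field_size) 2 == 0) != invert)
  let neg := base.map (fun x => !x)
  (PySem.List.pyRange 0 7 1).map (fun r =>
    if PySem.Int.mod (PySem.Int.floordiv r field_size) 2 == 0 then base else neg)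

-- ===== PRECONDITION & SPEC =====
-- Pre_ excludes field_size = 0: A raises ZeroDivisionError there whenever num_weeks > 0,
-- and B's row-template step divides by field_size unconditionally, so B raises there
-- even when num_weeks ≤ 0 (where A returns 7 empty rows).
def Pre_generate_checkerboard_py (num_weeks : Int) (field_size : Int) (invert : Bool) : Prop :=
  field_size ≠ 0
instance (num_weeks : Int) (field_size : Int) (invert : Bool) : Decidable (Pre_generate_checkerboard_py num_weeks field_size invert) := by unfold Pre_generate_checkerboard_py; infer_instance

def pvWitness_generate_checkerboard_py : Int × Int × Bool := (5, 2, false)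

def Spec_generate_checkerboard_py (num_weeks : Int) (field_size : Int) (invert : Bool) (out : List (List Bool)) : Prop := out = generate_checkerboard_py_alt num_weeks field_size invert
instance (num_weeks : Int) (field_size : Int) (invert : Bool) (out : List (List Bool)) : Decidable (Spec_generate_checkerboard_py num_weeks field_size invert out) := by unfold Spec_generate_checkerboard_py; infer_instance

-- ===== CLAIM (what is proved, stated in full; the proofs are below) =====
def Claim_equal_generate_checkerboard_py : Prop := ∀ (num_weeks : Int) (field_size : Int) (invert : Bool), Dom_generate_checkerboard_py num_weeks field_size invert → Pre_generate_checkerboard_py num_weeks field_size invert → Spec_generate_checkerboard_py num_weeks field_size invert (generate_checkerboard_py num_weeks field_size invert)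

-- ===== LEMMAS AND PROOFS =====

-- block parity of a sum splits into the two block parities
lemma pv_cell (a b : Int) (invert : Bool) :
    (if invert then !((a + b) % 2 == 0) else ((a + b) % 2 == 0))
      = (if (a % 2 == 0) = true then ((b % 2 == 0) != invert) else !((b % 2 == 0) != invert)) := by
  have ha : a % 2 = 0 ∨ a % 2 = 1 := Int.emod_two_eq a
  have hb : b % 2 = 0 ∨ b % 2 = 1 := Int.emod_two_eq b
  cases invert <;> rcases ha with ha | ha <;> rcases hb with hb | hb <;>
    simp [Int.add_emod, ha, hb]

-- ===== VERDICT (by name: the statement is the Claim_ definition above) =====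
theorem generate_checkerboard_py_spec : Claim_equal_generate_checkerboard_py := by
  intro num_weeks field_size invert _ _
  unfold Spec_generate_checkerboard_py generate_checkerboard_py generate_checkerboard_py_alt
  have hmod : ∀ x : Int, PySem.Int.mod x 2 = x % 2 :=
    fun x => PySem.Int.mod_eq_emod_of_pos (by norm_num)
  simp only [List.map_map, hmod]
  congr 1
  funext r
  by_cases hr : PySem.Int.floordiv r field_size % 2 = 0
  · have hr' : (PySem.Int.floordiv r field_size % 2 == 0) = true := by simpa using hr
    simp only [hr', if_true]
    congr 1
    funext c
    have h := pv_cell (PySem.Int.floordiv r field_size) (PySem.Int.floordiv c field_size) invert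
    rw [h, hr']
    simp
  · have hr' : (PySem.Int.floordiv r field_size % 2 == 0) = false := by simpa using hr
    simp only [hr']
    congr 1
    funext c
    have h := pv_cell (PySem.Int.floordiv r field_size) (PySem.Int.floordiv c field_size) invert
    rw [h, hr']
    simp
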